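-- pv_equiv track=rewrite | github.com/n-valchev/advent-of-code-py | src/advent_of_code/2022/day_08/__init__.py | get_visible_internal_trees
-- ===== SOURCE A (Python) =====
-- def get_visible_internal_trees(grid):
--     all_internal_visible_trees = set()
--     width = len(grid[0])
--     height = len(grid)
--
--     max_column_trees = [*grid[0]]
--     max_col_tree_reversed = [*grid[-1]]
--
--     for y, row in enumerate(grid[1:-1]):
--         last_max = row[0]
--         last_max_reversed = row[-1]
--
--         row_index = y + 1
--         reverse_row_index = height - row_index - 1
--
--         for x, _ in enumerate(row[1:-1]):
--             col_index = x + 1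
--             reverse_col_index = width - col_index - 1
--
--             # left
--             if row[col_index] > last_max:
--                 last_max = row[col_index]
--                 all_internal_visible_trees.add(f"{row_index},{col_index}")
--
--             # top
--             if row[col_index] > max_column_trees[col_index]:
--                 max_column_trees[col_index] = row[col_index]
--                 all_internal_visible_trees.add(f"{row_index},{col_index}")
--
--             # right
--             if row[reverse_col_index] > last_max_reversed:
--                 last_max_reversed = row[reverse_col_index]
--                 all_internal_visible_trees.add(f"{row_index},{reverse_col_index}")
--
--             # bottom
--             if grid[reverse_row_index][col_index] > max_col_tree_reversed[col_index]:
--                 max_col_tree_reversed[col_index] = grid[reverse_row_index][col_index]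
--                 all_internal_visible_trees.add(f"{reverse_row_index},{col_index}")
--
--     return all_internal_visible_trees
-- ===== SOURCE B (Python) =====
-- def get_visible_internal_trees(grid):
--     height = len(grid)
--     width = len(grid[0])
--     visible = set()
--     for r in range(1, height - 1):
--         for c in range(1, width - 1):
--             t = grid[r][c]
--             if (all(t > grid[r][cc] for cc in range(c))
--                     or all(t > grid[r][cc] for cc in range(c + 1, width))
--                     or all(t > grid[rr][c] for rr in range(r))
--                     or all(t > grid[rr][c] for rr in range(r + 1, height))):
--                 visible.add(f"{r},{c}")
--     return visible
-- ===== Notes on version B (the rewrite author's own statement) =====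
-- stated objective: simpler
-- what changed: Replaced A's single interleaved sweep that threads four running maxima (per-row prefix/suffix maxima and two mutated column-maximum arrays) through nested loops with a direct per-cell test: for each interior cell, scan outward in the four directions with all(...) and strict >; no mutable maxima state at all.
-- outside the precondition, e.g. on get_visible_internal_trees([[1, 2], [3, 4, 9], [5, 6]]): A returns {'1,1'}, B returns set()
import Mathlib
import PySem

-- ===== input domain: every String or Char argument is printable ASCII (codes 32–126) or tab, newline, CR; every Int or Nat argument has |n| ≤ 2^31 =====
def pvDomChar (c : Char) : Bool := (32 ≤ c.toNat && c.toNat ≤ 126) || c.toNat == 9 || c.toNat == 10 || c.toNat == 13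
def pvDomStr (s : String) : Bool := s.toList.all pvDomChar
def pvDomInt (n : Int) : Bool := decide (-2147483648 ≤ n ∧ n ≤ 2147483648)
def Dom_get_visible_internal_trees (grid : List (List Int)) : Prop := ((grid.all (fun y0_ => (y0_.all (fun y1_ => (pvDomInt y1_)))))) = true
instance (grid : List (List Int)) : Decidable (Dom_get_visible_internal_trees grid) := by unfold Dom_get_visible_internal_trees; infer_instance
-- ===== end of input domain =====

-- B replaces A's interleaved running-maxima sweep by a direct per-cell four-direction scan (simpler, no mutable state).
-- Both Pythons return a SET of strings (no iteration order); both ports return that set canonically sorted.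

-- f"{r},{c}"  (shared by both ports)
def pvKey (r c : Int) : String := PySem.Int.toStr r ++ "," ++ PySem.Int.toStr c

-- ===== PORT A =====
-- body of A's inner 'for x, _ in enumerate(row[1:-1])' loop (the four if-blocks, in order)
def pvAInner (grid : List (List Int)) (width rowIndex revRowIndex : Int) (row : List Int)
    (st2 : PySem.Set String × Int × Int × List Int × List Int) (xv : Int × Int) :
    PySem.Set String × Int × Int × List Int × List Int :=
  let trees := st2.1
  let lastMax := st2.2.1
  let lastMaxRev := st2.2.2.1
  let maxCols := st2.2.2.2.1
  let maxRev := st2.2.2.2.2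
  let colIndex := xv.1 + 1
  let revColIndex := width - colIndex - 1
  -- left
  let p1 : PySem.Set String × Int :=
    if PySem.List.pyGetD row colIndex 0 > lastMax then
      (PySem.Set.add trees (pvKey rowIndex colIndex), PySem.List.pyGetD row colIndex 0)
    else (trees, lastMax)
  -- top
  let p2 : PySem.Set String × List Int :=
    if PySem.List.pyGetD row colIndex 0 > PySem.List.pyGetD maxCols colIndex 0 then
      (PySem.Set.add p1.1 (pvKey rowIndex colIndex),
       PySem.List.pySetD maxCols colIndex (PySem.List.pyGetD row colIndex 0))
    else (p1.1, maxCols)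
  -- right
  let p3 : PySem.Set String × Int :=
    if PySem.List.pyGetD row revColIndex 0 > lastMaxRev then
      (PySem.Set.add p2.1 (pvKey rowIndex revColIndex), PySem.List.pyGetD row revColIndex 0)
    else (p2.1, lastMaxRev)
  -- bottom
  let p4 : PySem.Set String × List Int :=
    if PySem.List.pyGetD (PySem.List.pyGetD grid revRowIndex []) colIndex 0 >
        PySem.List.pyGetD maxRev colIndex 0 then
      (PySem.Set.add p3.1 (pvKey revRowIndex colIndex),
       PySem.List.pySetD maxRev colIndex (PySem.List.pyGetD (PySem.List.pyGetD grid revRowIndex []) colIndex 0))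
    else (p3.1, maxRev)
  (p4.1, p1.2, p3.2, p2.2, p4.2)

-- body of A's outer 'for y, row in enumerate(grid[1:-1])' loop
def pvAOuter (grid : List (List Int)) (width height : Int)
    (st : PySem.Set String × List Int × List Int) (yrow : Int × List Int) :
    PySem.Set String × List Int × List Int :=
  let row := yrow.2
  let rowIndex := yrow.1 + 1
  let revRowIndex := height - rowIndex - 1
  let st2 := (PySem.List.enumerate (PySem.List.slice row (some 1) (some (-1)))).foldl
      (pvAInner grid width rowIndex revRowIndex row)
      (st.1, PySem.List.pyGetD row 0 0, PySem.List.pyGetD row (-1) 0, st.2.1, st.2.2)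
  (st2.1, st2.2.2.2.1, st2.2.2.2.2)

def get_visible_internal_trees (grid : List (List Int)) : List String :=
  let width : Int := (PySem.List.pyGetD grid 0 []).length
  let height : Int := grid.length
  let st := (PySem.List.enumerate (PySem.List.slice grid (some 1) (some (-1)))).foldl
      (pvAOuter grid width height)
      (PySem.Set.empty, PySem.List.pyGetD grid 0 [], PySem.List.pyGetD grid (-1) [])
  PySem.List.sorted st.1 (fun s => s) false

-- ===== PORT B =====
-- visibility test of B: scan outward in the four directions with all(...) and strict >
def pvBVisible (grid : List (List Int)) (height width r c : Int) : Bool :=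
  let t := PySem.List.pyGetD (PySem.List.pyGetD grid r []) c 0
  ((PySem.List.pyRange 0 c).all fun cc =>
      decide (PySem.List.pyGetD (PySem.List.pyGetD grid r []) cc 0 < t))
  || ((PySem.List.pyRange (c + 1) width).all fun cc =>
      decide (PySem.List.pyGetD (PySem.List.pyGetD grid r []) cc 0 < t))
  || ((PySem.List.pyRange 0 r).all fun rr =>
      decide (PySem.List.pyGetD (PySem.List.pyGetD grid rr []) c 0 < t))
  || ((PySem.List.pyRange (r + 1) height).all fun rr =>
      decide (PySem.List.pyGetD (PySem.List.pyGetD grid rr []) c 0 < t))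

def get_visible_internal_trees_alt (grid : List (List Int)) : List String :=
  let height : Int := grid.length
  let width : Int := (PySem.List.pyGetD grid 0 []).length
  let visible := (PySem.List.pyRange 1 (height - 1)).foldl (fun vis r =>
      (PySem.List.pyRange 1 (width - 1)).foldl (fun vis c =>
        if pvBVisible grid height width r c then PySem.Set.add vis (pvKey r c) else vis) vis)
    PySem.Set.empty
  PySem.List.sorted visible (fun s => s) false

-- ===== PRECONDITION & SPEC =====
-- Pre_ excludes the empty grid (A raises IndexError on grid[0]) and, when the grid has at
-- least three rows and a row longer than two entries, ragged (non-rectangular) or zero-width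
-- grids: there A either raises or returns a value determined by accidental slice truncation
-- of the short rows.
def Pre_get_visible_internal_trees (grid : List (List Int)) : Prop :=
  grid ≠ [] ∧ (grid.length ≤ 2 ∨
    ((∀ row ∈ grid, row.length = grid.headI.length) ∧ grid.headI ≠ []) ∨
    ((∀ row ∈ grid, row.length ≤ 2) ∧ (∀ row ∈ (grid.drop 1).dropLast, row ≠ [])))
instance (grid : List (List Int)) : Decidable (Pre_get_visible_internal_trees grid) := by
  unfold Pre_get_visible_internal_trees; infer_instance
def pvWitness_get_visible_internal_trees : List (List Int) := [[3, 1, 2], [4, 9, 1], [2, 5, 8]]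

def Spec_get_visible_internal_trees (grid : List (List Int)) (out : List String) : Prop := out = get_visible_internal_trees_alt grid
instance (grid : List (List Int)) (out : List String) : Decidable (Spec_get_visible_internal_trees grid out) := by unfold Spec_get_visible_internal_trees; infer_instance

-- ===== CLAIM (what is proved, stated in full; the proofs are below) =====
def Claim_equal_get_visible_internal_trees : Prop := ∀ (grid : List (List Int)), Dom_get_visible_internal_trees grid → Pre_get_visible_internal_trees grid → Spec_get_visible_internal_trees grid (get_visible_internal_trees grid)

-- ===== LEMMAS AND PROOFS =====

-- grid value at (r, c), 0 when out of range
def pvG (grid : List (List Int)) (r c : Nat) : Int := (grid.getD r []).getD c 0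

-- max of row r over columns 0..k
def pvRowMax (grid : List (List Int)) (r : Nat) : Nat → Int
  | 0 => pvG grid r 0
  | k + 1 => max (pvRowMax grid r k) (pvG grid r (k + 1))

-- max of row r over columns w-1-k .. w-1
def pvRowMaxRev (grid : List (List Int)) (r w : Nat) : Nat → Int
  | 0 => pvG grid r (w - 1)
  | k + 1 => max (pvRowMaxRev grid r w k) (pvG grid r (w - 1 - (k + 1)))

-- max of column c over rows 0..t
def pvColMax (grid : List (List Int)) (c : Nat) : Nat → Int
  | 0 => pvG grid 0 c
  | t + 1 => max (pvColMax grid c t) (pvG grid (t + 1) c)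

-- max of column c over rows h-1-k .. h-1
def pvColMaxRev (grid : List (List Int)) (h c : Nat) : Nat → Int
  | 0 => pvG grid (h - 1) c
  | k + 1 => max (pvColMaxRev grid h c k) (pvG grid (h - 1 - (k + 1)) c)

def pvVisL (grid : List (List Int)) (r c : Nat) : Prop := ∀ cc, cc < c → pvG grid r cc < pvG grid r c
def pvVisR (grid : List (List Int)) (w r c : Nat) : Prop := ∀ cc, c < cc → cc < w → pvG grid r cc < pvG grid r c
def pvVisT (grid : List (List Int)) (r c : Nat) : Prop := ∀ rr, rr < r → pvG grid rr c < pvG grid r c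
def pvVisB (grid : List (List Int)) (h r c : Nat) : Prop := ∀ rr, r < rr → rr < h → pvG grid rr c < pvG grid r c

def pvSpecMem (grid : List (List Int)) (h w : Nat) (s : String) : Prop :=
  ∃ r c : Nat, 1 ≤ r ∧ r + 1 < h ∧ 1 ≤ c ∧ c + 1 < w ∧
    (pvVisL grid r c ∨ pvVisR grid w r c ∨ pvVisT grid r c ∨ pvVisB grid h r c) ∧
    s = pvKey (r : Int) (c : Int)

-- sorted canonicalization respects permutation (distinct strings)
theorem pv_sorted_eq_of_perm (xs ys : List String) (h : xs.Perm ys) (hy : ys.Nodup) :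
    PySem.List.sorted xs (fun s => s) false = PySem.List.sorted ys (fun s => s) false := by
  apply PySem.List.sorted_eq_of_perm_of_pairwise_lt xs (PySem.List.sorted ys (fun s => s) false) (fun s => s)
  · exact ((PySem.List.sorted_perm ys (fun s => s) false).trans h.symm)
  · have h1 := PySem.List.sorted_pairwise ys (fun s => s)
    have h2 : (PySem.List.sorted ys (fun s => s) false).Nodup :=
      (PySem.List.sorted_perm ys (fun s => s) false).nodup_iff.mpr hy
    exact (List.Pairwise.and h1 h2).imp (fun hab => lt_of_le_of_ne hab.1 hab.2)

theorem pv_mem_ite_add (c : Prop) [Decidable c] (T : PySem.Set String) (k s : String) :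
    (s ∈ (if c then PySem.Set.add T k else T)) ↔ s ∈ T ∨ (c ∧ s = k) := by
  split_ifs with hc
  · rw [PySem.Set.mem_add]; tauto
  · tauto

theorem pv_nodup_ite_add (c : Prop) [Decidable c] (T : PySem.Set String) (k : String)
    (h : T.Nodup) : (if c then PySem.Set.add T k else T).Nodup := by
  split_ifs
  · exact PySem.Set.nodup_add T k h
  · exact h

-- generic conditional-accumulation fold: membership and nodup
theorem pv_foldl_mem (G : PySem.Set String → Int → PySem.Set String) (Q : Int → String → Prop)
    (hG : ∀ T r s, s ∈ G T r ↔ s ∈ T ∨ Q r s) :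
    ∀ (l : List Int) (init : PySem.Set String) (s : String),
      s ∈ l.foldl G init ↔ s ∈ init ∨ ∃ r ∈ l, Q r s := by
  intro l
  induction l with
  | nil => intro init s; simp
  | cons a l ih =>
    intro init s
    rw [List.foldl_cons, ih, hG]
    simp only [List.mem_cons]
    constructor
    · rintro (⟨h | h⟩ | ⟨r, hr, hq⟩)
      · exact Or.inl h
      · exact Or.inr ⟨a, Or.inl rfl, h⟩
      · exact Or.inr ⟨r, Or.inr hr, hq⟩
    · rintro (h | ⟨r, rfl | hr, hq⟩)
      · exact Or.inl (Or.inl h)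
      · exact Or.inl (Or.inr hq)
      · exact Or.inr ⟨r, hr, hq⟩

theorem pv_foldl_nodup (G : PySem.Set String → Int → PySem.Set String)
    (hG : ∀ T r, T.Nodup → (G T r).Nodup) :
    ∀ (l : List Int) (init : PySem.Set String), init.Nodup → (l.foldl G init).Nodup := by
  intro l
  induction l with
  | nil => intro init h; simpa using h
  | cons a l ih => intro init h; exact ih _ (hG _ _ h)

-- max characterizations
theorem pvRowMax_lt_iff (grid : List (List Int)) (r : Nat) (v : Int) :
    ∀ k, (pvRowMax grid r k < v ↔ ∀ j, j ≤ k → pvG grid r j < v) := by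
  intro k
  induction k with
  | zero => simp [pvRowMax]
  | succ k ih =>
    simp only [pvRowMax, max_lt_iff, ih]
    constructor
    · rintro ⟨h1, h2⟩ j hj
      rcases Nat.lt_or_ge j (k + 1) with h | h
      · exact h1 j (by omega)
      · have : j = k + 1 := by omega
        subst this; exact h2
    · intro h
      exact ⟨fun j hj => h j (by omega), h (k + 1) le_rfl⟩

theorem pvRowMaxRev_lt_iff (grid : List (List Int)) (r w : Nat) (v : Int) :
    ∀ k, (pvRowMaxRev grid r w k < v ↔ ∀ i, i ≤ k → pvG grid r (w - 1 - i) < v) := by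
  intro k
  induction k with
  | zero => simp [pvRowMaxRev]
  | succ k ih =>
    simp only [pvRowMaxRev, max_lt_iff, ih]
    constructor
    · rintro ⟨h1, h2⟩ i hi
      rcases Nat.lt_or_ge i (k + 1) with h | h
      · exact h1 i (by omega)
      · have : i = k + 1 := by omega
        subst this; exact h2
    · intro h
      exact ⟨fun i hi => h i (by omega), h (k + 1) le_rfl⟩

theorem pvColMax_lt_iff (grid : List (List Int)) (c : Nat) (v : Int) :
    ∀ t, (pvColMax grid c t < v ↔ ∀ j, j ≤ t → pvG grid j c < v) := by
  intro t
  induction t with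
  | zero => simp [pvColMax]
  | succ t ih =>
    simp only [pvColMax, max_lt_iff, ih]
    constructor
    · rintro ⟨h1, h2⟩ j hj
      rcases Nat.lt_or_ge j (t + 1) with h | h
      · exact h1 j (by omega)
      · have : j = t + 1 := by omega
        subst this; exact h2
    · intro h
      exact ⟨fun j hj => h j (by omega), h (t + 1) le_rfl⟩

theorem pvColMaxRev_lt_iff (grid : List (List Int)) (h c : Nat) (v : Int) :
    ∀ k, (pvColMaxRev grid h c k < v ↔ ∀ i, i ≤ k → pvG grid (h - 1 - i) c < v) := by
  intro k
  induction k with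
  | zero => simp [pvColMaxRev]
  | succ k ih =>
    simp only [pvColMaxRev, max_lt_iff, ih]
    constructor
    · rintro ⟨h1, h2⟩ i hi
      rcases Nat.lt_or_ge i (k + 1) with hlt | hge
      · exact h1 i (by omega)
      · have : i = k + 1 := by omega
        subst this; exact h2
    · intro hh
      exact ⟨fun i hi => hh i (by omega), hh (k + 1) le_rfl⟩

-- list facts
theorem pv_slice_interior {α : Type} (xs : List α) :
    PySem.List.slice xs (some 1) (some (-1)) = (xs.drop 1).take (xs.length - 2) := by
  cases xs with
  | nil => rfl
  | cons a l =>
    have hnn : ¬((l.length : Int) < 0) := by omega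
    simp only [PySem.List.slice, PySem.List.clampIdx]
    norm_num [hnn]
    omega

theorem pv_pyGetD_neg_one {α : Type} (xs : List α) (d : α) (h : xs ≠ []) :
    PySem.List.pyGetD xs (-1) d = xs.getD (xs.length - 1) d := by
  have hlen : 0 < xs.length := List.length_pos_of_ne_nil h
  have h2 : -(xs.length:Int) ≤ -1 := by omega
  simp [PySem.List.pyGetD, PySem.List.pyGet?, PySem.List.pyIdx?, h2,
    List.getD_eq_getElem?_getD]

theorem pv_getD_set (xs : List Int) (n m : Nat) (v : Int) (hn : n < xs.length) :
    (xs.set n v).getD m 0 = if m = n then v else xs.getD m 0 := by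
  have := PySem.List.pyGetD_pySetD_natCast xs n m v 0 hn
  rwa [PySem.List.pySetD_natCast, PySem.List.pyGetD_natCast, PySem.List.pyGetD_natCast] at this

theorem pv_foldl_take_succ {γ δ : Type} (M : List γ) (f : δ → γ → δ) (i : δ) (k : Nat)
    (hk : k < M.length) :
    (M.take (k + 1)).foldl f i = f ((M.take k).foldl f i) M[k] := by
  have hsplit : M.take (k + 1) = M.take k ++ [M[k]] := by
    rw [List.take_add_one, List.getElem?_eq_getElem hk]
    rfl
  rw [hsplit, List.foldl_append, List.foldl_cons, List.foldl_nil]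

theorem pv_pyRange_nil (a b : Int) (h : b ≤ a) : PySem.List.pyRange a b = [] := by
  rw [List.eq_nil_iff_forall_not_mem]
  intro x hx
  rw [PySem.List.mem_pyRange_one] at hx
  omega

theorem pv_foldl_id {γ δ : Type} (l : List γ) (f : δ → γ → δ) (b : δ)
    (hf : ∀ x ∈ l, ∀ s, f s x = s) : l.foldl f b = b := by
  induction l generalizing b with
  | nil => rfl
  | cons a l ih =>
    rw [List.foldl_cons, hf a (by simp), ih]
    intro x hx s
    exact hf x (by simp [hx]) s

-- strings added by A's inner loop for row r after processing its first k interior columns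
def pvAddedRow (grid : List (List Int)) (h w r k : Nat) (s : String) : Prop :=
  (∃ c, 1 ≤ c ∧ c ≤ k ∧ (pvVisL grid r c ∨ pvVisT grid r c) ∧ s = pvKey (r : Int) (c : Int)) ∨
  (∃ x, 1 ≤ x ∧ x ≤ k ∧ pvVisR grid w r (w - 1 - x) ∧ s = pvKey (r : Int) ((w - 1 - x : Nat) : Int)) ∨
  (∃ c, 1 ≤ c ∧ c ≤ k ∧ pvVisB grid h (h - 1 - r) c ∧ s = pvKey ((h - 1 - r : Nat) : Int) (c : Int))

-- invariant of A's inner loop state (trees, lastMax, lastMaxRev, maxCols, maxRev)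
def pvInnerInv (grid : List (List Int)) (h w r k : Nat) (T0 : PySem.Set String)
    (S : PySem.Set String × Int × Int × List Int × List Int) : Prop :=
  S.2.1 = pvRowMax grid r k ∧
  S.2.2.1 = pvRowMaxRev grid r w k ∧
  S.2.2.2.1.length = w ∧
  S.2.2.2.2.length = w ∧
  (∀ c, 1 ≤ c → c + 1 < w →
    S.2.2.2.1.getD c 0 = if c ≤ k then pvColMax grid c r else pvColMax grid c (r - 1)) ∧
  (∀ c, 1 ≤ c → c + 1 < w →
    S.2.2.2.2.getD c 0 = if c ≤ k then pvColMaxRev grid h c r else pvColMaxRev grid h c (r - 1)) ∧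
  S.1.Nodup ∧
  (∀ s, s ∈ S.1 ↔ s ∈ T0 ∨ pvAddedRow grid h w r k s)

-- invariant of A's outer loop state after processing rows 1..t
def pvOuterInv (grid : List (List Int)) (h w t : Nat)
    (S : PySem.Set String × List Int × List Int) : Prop :=
  S.2.1.length = w ∧
  S.2.2.length = w ∧
  (∀ c, 1 ≤ c → c + 1 < w → S.2.1.getD c 0 = pvColMax grid c t) ∧
  (∀ c, 1 ≤ c → c + 1 < w → S.2.2.getD c 0 = pvColMaxRev grid h c t) ∧
  S.1.Nodup ∧
  (∀ s, s ∈ S.1 ↔ ∃ r, 1 ≤ r ∧ r ≤ t ∧ pvAddedRow grid h w r (w - 2) s)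

-- AddedRow step
theorem pvAddedRow_succ (grid : List (List Int)) (h w r k : Nat) (hk : k + 1 ≤ w - 2) (s : String) :
    pvAddedRow grid h w r (k + 1) s ↔ pvAddedRow grid h w r k s ∨
      ((pvVisL grid r (k + 1) ∨ pvVisT grid r (k + 1)) ∧ s = pvKey (r : Int) ((k + 1 : Nat) : Int)) ∨
      (pvVisR grid w r (w - 1 - (k + 1)) ∧ s = pvKey (r : Int) ((w - 1 - (k + 1) : Nat) : Int)) ∨
      (pvVisB grid h (h - 1 - r) (k + 1) ∧ s = pvKey ((h - 1 - r : Nat) : Int) ((k + 1 : Nat) : Int)) := by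
  unfold pvAddedRow
  constructor
  · rintro (⟨c, h1, h2, hv, rfl⟩ | ⟨x, h1, h2, hv, rfl⟩ | ⟨c, h1, h2, hv, rfl⟩)
    · rcases Nat.lt_or_ge c (k + 1) with hc | hc
      · exact Or.inl (Or.inl ⟨c, h1, by omega, hv, rfl⟩)
      · have : c = k + 1 := by omega
        subst this; exact Or.inr (Or.inl ⟨hv, rfl⟩)
    · rcases Nat.lt_or_ge x (k + 1) with hc | hc
      · exact Or.inl (Or.inr (Or.inl ⟨x, h1, by omega, hv, rfl⟩))
      · have : x = k + 1 := by omega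
        subst this; exact Or.inr (Or.inr (Or.inl ⟨hv, rfl⟩))
    · rcases Nat.lt_or_ge c (k + 1) with hc | hc
      · exact Or.inl (Or.inr (Or.inr ⟨c, h1, by omega, hv, rfl⟩))
      · have : c = k + 1 := by omega
        subst this; exact Or.inr (Or.inr (Or.inr ⟨hv, rfl⟩))
  · rintro ((⟨c, h1, h2, hv, rfl⟩ | ⟨x, h1, h2, hv, rfl⟩ | ⟨c, h1, h2, hv, rfl⟩) |
      ⟨hv, rfl⟩ | ⟨hv, rfl⟩ | ⟨hv, rfl⟩)
    · exact Or.inl ⟨c, h1, by omega, hv, rfl⟩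
    · exact Or.inr (Or.inl ⟨x, h1, by omega, hv, rfl⟩)
    · exact Or.inr (Or.inr ⟨c, h1, by omega, hv, rfl⟩)
    · exact Or.inl ⟨k + 1, by omega, le_rfl, hv, rfl⟩
    · exact Or.inr (Or.inl ⟨k + 1, by omega, le_rfl, hv, rfl⟩)
    · exact Or.inr (Or.inr ⟨k + 1, by omega, le_rfl, hv, rfl⟩)


-- projections of an if-of-pair
theorem pv_fst_ite_pair {β γ : Type} (c : Prop) [Decidable c] (x y : β) (u v : γ) :
    (if c then (x, u) else (y, v)).1 = if c then x else y := by split_ifs <;> rfl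
theorem pv_snd_ite_pair {β γ : Type} (c : Prop) [Decidable c] (x y : β) (u v : γ) :
    (if c then (x, u) else (y, v)).2 = if c then u else v := by split_ifs <;> rfl

theorem pvAddedRow_zero (grid : List (List Int)) (h w r : Nat) (s : String) :
    ¬ pvAddedRow grid h w r 0 s := by
  rintro (⟨c, h1, h2, _⟩ | ⟨x, h1, h2, _⟩ | ⟨c, h1, h2, _⟩) <;> omega

-- condition translations: running-max comparison = directional visibility
theorem pv_condL_iff (grid : List (List Int)) (r k : Nat) :
    pvG grid r (k + 1) > pvRowMax grid r k ↔ pvVisL grid r (k + 1) := by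
  rw [gt_iff_lt, pvRowMax_lt_iff]
  unfold pvVisL
  constructor
  · intro H cc hcc; exact H cc (by omega)
  · intro H j hj; exact H j (by omega)

theorem pv_condT_iff (grid : List (List Int)) (r k : Nat) (hr : 1 ≤ r) :
    pvG grid r (k + 1) > pvColMax grid (k + 1) (r - 1) ↔ pvVisT grid r (k + 1) := by
  rw [gt_iff_lt, pvColMax_lt_iff]
  unfold pvVisT
  constructor
  · intro H rr hrr; exact H rr (by omega)
  · intro H j hj; exact H j (by omega)

theorem pv_condR_iff (grid : List (List Int)) (w r k : Nat) (hk : k + 1 ≤ w - 2) :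
    pvG grid r (w - 1 - (k + 1)) > pvRowMaxRev grid r w k ↔ pvVisR grid w r (w - 1 - (k + 1)) := by
  rw [gt_iff_lt, pvRowMaxRev_lt_iff]
  unfold pvVisR
  constructor
  · intro H cc h1 h2
    have hi : w - 1 - cc ≤ k := by omega
    have e : w - 1 - (w - 1 - cc) = cc := by omega
    have := H (w - 1 - cc) hi
    rwa [e] at this
  · intro H i hi
    exact H (w - 1 - i) (by omega) (by omega)

theorem pv_condB_iff (grid : List (List Int)) (h r c : Nat) (hr1 : 1 ≤ r) (hr2 : r + 1 ≤ h) :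
    pvG grid (h - 1 - r) c > pvColMaxRev grid h c (r - 1) ↔ pvVisB grid h (h - 1 - r) c := by
  rw [gt_iff_lt, pvColMaxRev_lt_iff]
  unfold pvVisB
  constructor
  · intro H rr h1 h2
    have hi : h - 1 - rr ≤ r - 1 := by omega
    have e : h - 1 - (h - 1 - rr) = rr := by omega
    have := H (h - 1 - rr) hi
    rwa [e] at this
  · intro H i hi
    exact H (h - 1 - i) (by omega) (by omega)

-- recursion unfoldings at r (r ≥ 1)
theorem pvColMax_succ' (grid : List (List Int)) (c r : Nat) (hr : 1 ≤ r) :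
    pvColMax grid c r = max (pvColMax grid c (r - 1)) (pvG grid r c) := by
  conv_lhs => rw [show r = (r - 1) + 1 by omega]
  rw [pvColMax]
  congr 2
  omega

theorem pvColMaxRev_succ' (grid : List (List Int)) (h c r : Nat) (hr : 1 ≤ r) :
    pvColMaxRev grid h c r = max (pvColMaxRev grid h c (r - 1)) (pvG grid (h - 1 - r) c) := by
  conv_lhs => rw [show r = (r - 1) + 1 by omega]
  rw [pvColMaxRev]
  congr 2
  omega

-- THE inner-loop step: one iteration of A's inner loop preserves the invariant
theorem pvInner_step (grid : List (List Int)) (h w r k : Nat) (T0 : PySem.Set String)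
    (hw : ∀ i, i < h → (grid.getD i []).length = w)
    (hr1 : 1 ≤ r) (hr2 : r + 1 < h) (hk : k + 1 ≤ w - 2)
    (S : PySem.Set String × Int × Int × List Int × List Int)
    (hS : pvInnerInv grid h w r k T0 S) (q : Int × Int) (hq : q.1 = (k : Int)) :
    pvInnerInv grid h w r (k + 1) T0
      (pvAInner grid (w : Int) (r : Int) ((h - 1 - r : Nat) : Int) (grid.getD r []) S q) := by
  obtain ⟨T, a, b, MC, MR⟩ := S
  obtain ⟨h1, h2, h3, h4, h5, h6, h7, h8⟩ := hS
  simp only at h1 h2 h3 h4 h5 h6 h7 h8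
  subst h1 h2
  obtain ⟨x, xv⟩ := q
  simp only at hq
  subst hq
  -- index normalizations
  have ec : ((k : Int) + 1) = ((k + 1 : Nat) : Int) := by push_cast; ring
  have erc : (w : Int) - ((k : Int) + 1) - 1 = ((w - 1 - (k + 1) : Nat) : Int) := by omega
  -- value computations
  have hvL : PySem.List.pyGetD (grid.getD r []) ((k : Int) + 1) 0 = pvG grid r (k + 1) := by
    rw [ec, PySem.List.pyGetD_natCast]; rfl
  have hvR : PySem.List.pyGetD (grid.getD r []) ((w : Int) - ((k : Int) + 1) - 1) 0
      = pvG grid r (w - 1 - (k + 1)) := by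
    rw [erc, PySem.List.pyGetD_natCast]; rfl
  have hvB : PySem.List.pyGetD (PySem.List.pyGetD grid ((h - 1 - r : Nat) : Int) [])
      ((k : Int) + 1) 0 = pvG grid (h - 1 - r) (k + 1) := by
    rw [ec, PySem.List.pyGetD_natCast, PySem.List.pyGetD_natCast]; rfl
  have hMCold : PySem.List.pyGetD MC ((k : Int) + 1) 0 = pvColMax grid (k + 1) (r - 1) := by
    rw [ec, PySem.List.pyGetD_natCast, h5 (k + 1) (by omega) (by omega), if_neg (by omega)]
  have hMRold : PySem.List.pyGetD MR ((k : Int) + 1) 0 = pvColMaxRev grid h (k + 1) (r - 1) := by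
    rw [ec, PySem.List.pyGetD_natCast, h6 (k + 1) (by omega) (by omega), if_neg (by omega)]
  unfold pvAInner
  simp only [hvL, hvR, hvB, hMCold, hMRold, pv_fst_ite_pair, pv_snd_ite_pair]
  rw [ec]
  simp only [PySem.List.pySetD_natCast]
  refine ⟨?_, ?_, ?_, ?_, ?_, ?_, ?_, ?_⟩
  · -- lastMax
    simp only
    rw [pvRowMax]
    split_ifs with hc
    · exact (max_eq_right (le_of_lt hc)).symm
    · exact (max_eq_left (not_lt.mp hc)).symm
  · -- lastMaxRev
    simp only
    rw [pvRowMaxRev]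
    split_ifs with hc
    · exact (max_eq_right (le_of_lt hc)).symm
    · exact (max_eq_left (not_lt.mp hc)).symm
  · -- maxCols length
    simp only
    split_ifs <;> simp [h3]
  · -- maxRev length
    simp only
    split_ifs <;> simp [h4]
  · -- maxCols values
    intro c hc1 hc2
    simp only
    by_cases hcond : pvG grid r (k + 1) > pvColMax grid (k + 1) (r - 1)
    · rw [if_pos hcond, pv_getD_set MC (k + 1) c _ (by omega)]
      by_cases hcc : c = k + 1
      · subst hcc
        rw [if_pos rfl, if_pos (le_refl (k + 1)), pvColMax_succ' grid (k + 1) r hr1,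
          max_eq_right (le_of_lt hcond)]
      · rw [if_neg hcc, h5 c hc1 hc2]
        by_cases hck : c ≤ k
        · rw [if_pos hck, if_pos (show c ≤ k + 1 by omega)]
        · rw [if_neg hck, if_neg (show ¬ c ≤ k + 1 by omega)]
    · rw [if_neg hcond, h5 c hc1 hc2]
      by_cases hcc : c = k + 1
      · subst hcc
        rw [if_neg (show ¬ k + 1 ≤ k by omega), if_pos (le_refl (k + 1)),
          pvColMax_succ' grid (k + 1) r hr1, max_eq_left (not_lt.mp hcond)]
      · by_cases hck : c ≤ k
        · rw [if_pos hck, if_pos (show c ≤ k + 1 by omega)]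
        · rw [if_neg hck, if_neg (show ¬ c ≤ k + 1 by omega)]
  · -- maxRev values
    intro c hc1 hc2
    simp only
    by_cases hcond : pvG grid (h - 1 - r) (k + 1) > pvColMaxRev grid h (k + 1) (r - 1)
    · rw [if_pos hcond, pv_getD_set MR (k + 1) c _ (by omega)]
      by_cases hcc : c = k + 1
      · subst hcc
        rw [if_pos rfl, if_pos (le_refl (k + 1)), pvColMaxRev_succ' grid h (k + 1) r hr1,
          max_eq_right (le_of_lt hcond)]
      · rw [if_neg hcc, h6 c hc1 hc2]
        by_cases hck : c ≤ k
        · rw [if_pos hck, if_pos (show c ≤ k + 1 by omega)]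
        · rw [if_neg hck, if_neg (show ¬ c ≤ k + 1 by omega)]
    · rw [if_neg hcond, h6 c hc1 hc2]
      by_cases hcc : c = k + 1
      · subst hcc
        rw [if_neg (show ¬ k + 1 ≤ k by omega), if_pos (le_refl (k + 1)),
          pvColMaxRev_succ' grid h (k + 1) r hr1, max_eq_left (not_lt.mp hcond)]
      · by_cases hck : c ≤ k
        · rw [if_pos hck, if_pos (show c ≤ k + 1 by omega)]
        · rw [if_neg hck, if_neg (show ¬ c ≤ k + 1 by omega)]
  · -- nodup
    simp only
    exact pv_nodup_ite_add _ _ _ (pv_nodup_ite_add _ _ _ (pv_nodup_ite_add _ _ _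
      (pv_nodup_ite_add _ _ _ h7)))
  · -- membership
    intro s
    have erc2 : (w : Int) - ((k + 1 : Nat) : Int) - 1 = ((w - 1 - (k + 1) : Nat) : Int) := by omega
    rw [erc2]
    simp only [pv_mem_ite_add, h8, pvAddedRow_succ grid h w r k hk s,
      pv_condL_iff grid r k, pv_condT_iff grid r k hr1, pv_condR_iff grid w r k hk,
      pv_condB_iff grid h r (k + 1) hr1 (by omega)]
    constructor
    · rintro ((((hh | ⟨hv, hs⟩) | ⟨hv, hs⟩) | ⟨hv, hs⟩) | ⟨hv, hs⟩)
      · rcases hh with h0 | hA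
        · exact Or.inl h0
        · exact Or.inr (Or.inl hA)
      · exact Or.inr (Or.inr (Or.inl ⟨Or.inl hv, hs⟩))
      · exact Or.inr (Or.inr (Or.inl ⟨Or.inr hv, hs⟩))
      · exact Or.inr (Or.inr (Or.inr (Or.inl ⟨hv, hs⟩)))
      · exact Or.inr (Or.inr (Or.inr (Or.inr ⟨hv, hs⟩)))
    · rintro (h0 | hA | ⟨hv | hv, hs⟩ | ⟨hv, hs⟩ | ⟨hv, hs⟩)
      · exact Or.inl (Or.inl (Or.inl (Or.inl (Or.inl h0))))
      · exact Or.inl (Or.inl (Or.inl (Or.inl (Or.inr hA))))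
      · exact Or.inl (Or.inl (Or.inl (Or.inr ⟨hv, hs⟩)))
      · exact Or.inl (Or.inl (Or.inr ⟨hv, hs⟩))
      · exact Or.inl (Or.inr ⟨hv, hs⟩)
      · exact Or.inr ⟨hv, hs⟩


-- A's inner loop satisfies the invariant at every prefix
theorem pvInner_loop (grid : List (List Int)) (h w r : Nat) (T0 : PySem.Set String)
    (MC0 MR0 : List Int)
    (hw : ∀ i, i < h → (grid.getD i []).length = w) (hh : grid.length = h)
    (hwpos : 1 ≤ w) (hr1 : 1 ≤ r) (hr2 : r + 1 < h)
    (hMClen : MC0.length = w) (hMRlen : MR0.length = w)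
    (hMC : ∀ c, 1 ≤ c → c + 1 < w → MC0.getD c 0 = pvColMax grid c (r - 1))
    (hMR : ∀ c, 1 ≤ c → c + 1 < w → MR0.getD c 0 = pvColMaxRev grid h c (r - 1))
    (hT0 : T0.Nodup) :
    ∀ k, k ≤ w - 2 →
      pvInnerInv grid h w r k T0
        (((PySem.List.enumerate (PySem.List.slice (grid.getD r []) (some 1) (some (-1)))).take k).foldl
          (pvAInner grid (w : Int) (r : Int) ((h - 1 - r : Nat) : Int) (grid.getD r []))
          (T0, PySem.List.pyGetD (grid.getD r []) 0 0,
            PySem.List.pyGetD (grid.getD r []) (-1) 0, MC0, MR0)) := by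
  have hrowlen : (grid.getD r []).length = w := hw r (by omega)
  have hrowne : grid.getD r [] ≠ [] := by
    intro hcon
    rw [hcon] at hrowlen
    simp at hrowlen
    omega
  have hMlen : (PySem.List.enumerate
      (PySem.List.slice (grid.getD r []) (some 1) (some (-1)))).length = w - 2 := by
    rw [PySem.List.length_enumerate, pv_slice_interior, List.length_take, List.length_drop,
      hrowlen]
    omega
  intro k
  induction k with
  | zero =>
    intro _
    rw [List.take_zero, List.foldl_nil]
    refine ⟨?_, ?_, hMClen, hMRlen, ?_, ?_, hT0, ?_⟩
    · simp only [PySem.List.pyGetD_of_nonneg _ _ (by norm_num : (0:Int) ≤ 0)]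
      rfl
    · simp only
      rw [pv_pyGetD_neg_one _ _ hrowne, hrowlen]
      rfl
    · intro c hc1 hc2
      rw [if_neg (by omega), hMC c hc1 hc2]
    · intro c hc1 hc2
      rw [if_neg (by omega), hMR c hc1 hc2]
    · intro s
      simp [pvAddedRow_zero grid h w r s]
  | succ k ih =>
    intro hk
    have hklt : k < (PySem.List.enumerate
        (PySem.List.slice (grid.getD r []) (some 1) (some (-1)))).length := by omega
    rw [pv_foldl_take_succ _ _ _ k hklt]
    apply pvInner_step grid h w r k T0 hw hr1 hr2 hk _ (ih (by omega))
    rw [PySem.List.getElem_enumerate _ _ k hklt]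
    simp

-- one iteration of A's outer loop preserves the invariant
theorem pvOuter_step (grid : List (List Int)) (h w t : Nat)
    (hw : ∀ i, i < h → (grid.getD i []).length = w) (hh : grid.length = h) (hwpos : 1 ≤ w)
    (ht : t + 1 ≤ h - 2)
    (S : PySem.Set String × List Int × List Int) (hS : pvOuterInv grid h w t S) :
    pvOuterInv grid h w (t + 1)
      (pvAOuter grid (w : Int) (h : Int) S ((t : Int), grid.getD (t + 1) [])) := by
  obtain ⟨Tt, MCt, MRt⟩ := S
  obtain ⟨o1, o2, o3, o4, o5, o6⟩ := hS
  simp only at o1 o2 o3 o4 o5 o6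
  unfold pvAOuter
  simp only
  have e1 : (t : Int) + 1 = ((t + 1 : Nat) : Int) := by push_cast; ring
  have e2 : (h : Int) - ((t : Int) + 1) - 1 = ((h - 1 - (t + 1) : Nat) : Int) := by omega
  rw [e2, e1]
  have hMlen : (PySem.List.enumerate
      (PySem.List.slice (grid.getD (t + 1) []) (some 1) (some (-1)))).length = w - 2 := by
    rw [PySem.List.length_enumerate, pv_slice_interior, List.length_take, List.length_drop,
      hw (t + 1) (by omega)]
    omega
  have hfull : PySem.List.enumerate
      (PySem.List.slice (grid.getD (t + 1) []) (some 1) (some (-1)))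
      = (PySem.List.enumerate
          (PySem.List.slice (grid.getD (t + 1) []) (some 1) (some (-1)))).take (w - 2) := by
    rw [← hMlen, List.take_length]
  rw [hfull]
  have hinner := pvInner_loop grid h w (t + 1) Tt MCt MRt hw hh hwpos (by omega) (by omega)
    o1 o2 (by simpa using o3) (by simpa using o4) o5 (w - 2) le_rfl
  obtain ⟨i1, i2, i3, i4, i5, i6, i7, i8⟩ := hinner
  refine ⟨by simpa using i3, by simpa using i4, ?_, ?_, by simpa using i7, ?_⟩
  · intro c hc1 hc2
    have := i5 c hc1 hc2
    rw [if_pos (by omega)] at this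
    simpa using this
  · intro c hc1 hc2
    have := i6 c hc1 hc2
    rw [if_pos (by omega)] at this
    simpa using this
  · intro s
    have hmem := i8 s
    simp only at hmem
    rw [hmem, o6 s]
    constructor
    · rintro (⟨r', ha, hb, hA⟩ | hA)
      · exact ⟨r', ha, by omega, hA⟩
      · exact ⟨t + 1, by omega, le_rfl, hA⟩
    · rintro ⟨r', ha, hb, hA⟩
      rcases Nat.lt_or_ge r' (t + 1) with hlt | hge
      · exact Or.inl ⟨r', ha, by omega, hA⟩
      · have : r' = t + 1 := by omega
        subst this
        exact Or.inr hA

-- A's outer loop satisfies the invariant at every prefix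
theorem pvOuter_loop (grid : List (List Int)) (w : Nat)
    (hne : grid ≠ [])
    (hw : ∀ i, i < grid.length → (grid.getD i []).length = w) (hwpos : 1 ≤ w) :
    ∀ t, t ≤ grid.length - 2 →
      pvOuterInv grid grid.length w t
        (((PySem.List.enumerate (PySem.List.slice grid (some 1) (some (-1)))).take t).foldl
          (pvAOuter grid (w : Int) (grid.length : Int))
          (PySem.Set.empty, grid.getD 0 [], grid.getD (grid.length - 1) [])) := by
  have hpos : 0 < grid.length := List.length_pos_of_ne_nil hne
  have hLlen : (PySem.List.enumerate (PySem.List.slice grid (some 1) (some (-1)))).length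
      = grid.length - 2 := by
    rw [PySem.List.length_enumerate, pv_slice_interior, List.length_take, List.length_drop]
    omega
  intro t
  induction t with
  | zero =>
    intro _
    rw [List.take_zero, List.foldl_nil]
    refine ⟨hw 0 hpos, hw (grid.length - 1) (by omega), ?_, ?_, List.nodup_nil, ?_⟩
    · intro c hc1 hc2; rfl
    · intro c hc1 hc2; rfl
    · intro s
      simp only [PySem.Set.empty]
      constructor
      · intro hcon; simp at hcon
      · rintro ⟨r, ha, hb, _⟩; omega
  | succ t ih =>
    intro ht
    have hklt : t < (PySem.List.enumerate
        (PySem.List.slice grid (some 1) (some (-1)))).length := by omega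
    rw [pv_foldl_take_succ _ _ _ t hklt]
    have helem : (PySem.List.enumerate (PySem.List.slice grid (some 1) (some (-1))))[t]
        = ((t : Int), grid.getD (t + 1) []) := by
      rw [PySem.List.getElem_enumerate _ _ t hklt]
      have hslt : t < (PySem.List.slice grid (some 1) (some (-1))).length := by
        rw [PySem.List.length_enumerate] at hklt
        exact hklt
      congr 1
      · omega
      · have h2 : (PySem.List.slice grid (some 1) (some (-1)))[t]
            = grid[t + 1]'(by
              have := hslt
              rw [pv_slice_interior] at this
              simp at this
              omega) := by
          simp only [pv_slice_interior] at hslt ⊢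
          rw [List.getElem_take, List.getElem_drop]
          congr 1
          omega
        rw [h2, List.getD_eq_getElem]
    rw [helem]
    exact pvOuter_step grid grid.length w t hw rfl hwpos (by omega) _ (ih (by omega))


-- A's total contribution equals the per-cell visibility specification
theorem pvAdded_iff_spec (grid : List (List Int)) (h w : Nat) (s : String) :
    (∃ r, 1 ≤ r ∧ r ≤ h - 2 ∧ pvAddedRow grid h w r (w - 2) s) ↔ pvSpecMem grid h w s := by
  constructor
  · rintro ⟨r, hr1, hr2, (⟨c, h1, h2, hv, rfl⟩ | ⟨x, h1, h2, hv, rfl⟩ | ⟨c, h1, h2, hv, rfl⟩)⟩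
    · exact ⟨r, c, hr1, by omega, h1, by omega, by tauto, rfl⟩
    · exact ⟨r, w - 1 - x, hr1, by omega, by omega, by omega, Or.inr (Or.inl hv), rfl⟩
    · exact ⟨h - 1 - r, c, by omega, by omega, h1, by omega,
        Or.inr (Or.inr (Or.inr hv)), rfl⟩
  · rintro ⟨r, c, h1, h2, h3, h4, hv | hv | hv | hv, rfl⟩
    · exact ⟨r, h1, by omega, Or.inl ⟨c, h3, by omega, Or.inl hv, rfl⟩⟩
    · refine ⟨r, h1, by omega, Or.inr (Or.inl ⟨w - 1 - c, by omega, by omega, ?_, ?_⟩)⟩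
      · have e : w - 1 - (w - 1 - c) = c := by omega
        rw [e]
        exact hv
      · have e : w - 1 - (w - 1 - c) = c := by omega
        rw [e]
    · exact ⟨r, h1, by omega, Or.inl ⟨c, h3, by omega, Or.inr hv, rfl⟩⟩
    · refine ⟨h - 1 - r, by omega, by omega, Or.inr (Or.inr ⟨c, h3, by omega, ?_, ?_⟩)⟩
      · have e : h - 1 - (h - 1 - r) = r := by omega
        rw [e]
        exact hv
      · have e : h - 1 - (h - 1 - r) = r := by omega
        rw [e]

-- all(...) over a Python range of ints, as a statement over Nat
theorem pv_all_lt_iff (g : Int → Int) (B : Nat) (v : Int) :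
    (((PySem.List.pyRange 0 (B : Int)).all fun x => decide (g x < v)) = true)
      ↔ ∀ j : Nat, j < B → g (j : Int) < v := by
  rw [List.all_eq_true]
  constructor
  · intro H j hj
    have := H (j : Int) (PySem.List.mem_pyRange_one.mpr ⟨by positivity, by exact_mod_cast hj⟩)
    simpa using this
  · intro H x hx
    have hb := PySem.List.mem_pyRange_one.mp hx
    have hx0 : x = ((x.toNat : Nat) : Int) := by omega
    simp only [decide_eq_true_eq]
    rw [hx0]
    exact H x.toNat (by omega)

theorem pv_all_between_iff (g : Int → Int) (A B : Nat) (v : Int) :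
    (((PySem.List.pyRange ((A : Nat) : Int) (B : Int)).all fun x => decide (g x < v)) = true)
      ↔ ∀ j : Nat, A ≤ j → j < B → g (j : Int) < v := by
  rw [List.all_eq_true]
  constructor
  · intro H j hj1 hj2
    have := H (j : Int) (PySem.List.mem_pyRange_one.mpr ⟨by exact_mod_cast hj1, by exact_mod_cast hj2⟩)
    simpa using this
  · intro H x hx
    have hb := PySem.List.mem_pyRange_one.mp hx
    have hx0 : x = ((x.toNat : Nat) : Int) := by omega
    simp only [decide_eq_true_eq]
    rw [hx0]
    exact H x.toNat (by omega) (by omega)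

-- B's per-cell test equals the four visibility predicates
theorem pvBVisible_eq (grid : List (List Int)) (h w r c : Nat) :
    (pvBVisible grid (h : Int) (w : Int) (r : Int) (c : Int) = true)
      ↔ (pvVisL grid r c ∨ pvVisR grid w r c ∨ pvVisT grid r c ∨ pvVisB grid h r c) := by
  unfold pvBVisible
  simp only [PySem.List.pyGetD_natCast]
  have ec1 : ((c : Int) + 1) = ((c + 1 : Nat) : Int) := by push_cast; ring
  have er1 : ((r : Int) + 1) = ((r + 1 : Nat) : Int) := by push_cast; ring
  rw [ec1, er1]
  simp only [Bool.or_eq_true]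
  rw [pv_all_lt_iff (fun x => PySem.List.pyGetD ((grid.getD r [] : List Int)) x 0) c,
    pv_all_between_iff (fun x => PySem.List.pyGetD ((grid.getD r [] : List Int)) x 0) (c + 1) w,
    pv_all_lt_iff (fun x => (PySem.List.pyGetD grid x []).getD c 0) r,
    pv_all_between_iff (fun x => (PySem.List.pyGetD grid x []).getD c 0) (r + 1) h]
  simp only [PySem.List.pyGetD_natCast]
  unfold pvVisL pvVisR pvVisT pvVisB pvG
  constructor
  · rintro (((H | H) | H) | H)
    · exact Or.inl (fun cc hcc => H cc hcc)
    · exact Or.inr (Or.inl (fun cc hc1 hc2 => H cc (by omega) hc2))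
    · exact Or.inr (Or.inr (Or.inl (fun rr hrr => H rr hrr)))
    · exact Or.inr (Or.inr (Or.inr (fun rr h1 h2 => H rr (by omega) h2)))
  · rintro (H | H | H | H)
    · exact Or.inl (Or.inl (Or.inl (fun j hj => H j hj)))
    · exact Or.inl (Or.inl (Or.inr (fun j h1 h2 => H j (by omega) h2)))
    · exact Or.inl (Or.inr (fun j hj => H j hj))
    · exact Or.inr (fun j h1 h2 => H j (by omega) h2)

-- membership in B's set
theorem pvB_mem (grid : List (List Int)) (h w : Nat) (s : String) :
    s ∈ ((PySem.List.pyRange 1 ((h : Int) - 1)).foldl (fun vis r =>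
        (PySem.List.pyRange 1 ((w : Int) - 1)).foldl (fun vis c =>
          if pvBVisible grid (h : Int) (w : Int) r c then PySem.Set.add vis (pvKey r c) else vis) vis)
      PySem.Set.empty) ↔ pvSpecMem grid h w s := by
  rw [pv_foldl_mem _ (fun r s => ∃ c ∈ PySem.List.pyRange 1 ((w : Int) - 1),
      (pvBVisible grid (h : Int) (w : Int) r c = true) ∧ s = pvKey r c)
    (fun T r s => by
      rw [pv_foldl_mem _ (fun c s => (pvBVisible grid (h : Int) (w : Int) r c = true) ∧ s = pvKey r c)
        (fun T c s => pv_mem_ite_add _ T (pvKey r c) s)])]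
  simp only [PySem.Set.empty, List.not_mem_nil, false_or]
  constructor
  · rintro ⟨r, hr, c, hc, hvis, rfl⟩
    have hbr := PySem.List.mem_pyRange_one.mp hr
    have hbc := PySem.List.mem_pyRange_one.mp hc
    have her : r = ((r.toNat : Nat) : Int) := by omega
    have hec : c = ((c.toNat : Nat) : Int) := by omega
    rw [her, hec] at hvis ⊢
    rw [pvBVisible_eq grid h w r.toNat c.toNat] at hvis
    exact ⟨r.toNat, c.toNat, by omega, by omega, by omega, by omega, hvis, rfl⟩
  · rintro ⟨r, c, h1, h2, h3, h4, hv, rfl⟩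
    refine ⟨(r : Int), PySem.List.mem_pyRange_one.mpr ⟨by exact_mod_cast h1, by omega⟩,
      (c : Int), PySem.List.mem_pyRange_one.mpr ⟨by exact_mod_cast h3, by omega⟩, ?_, rfl⟩
    exact (pvBVisible_eq grid h w r c).mpr hv

-- B's set has no duplicates
theorem pvB_nodup (grid : List (List Int)) (h w : Nat) :
    ((PySem.List.pyRange 1 ((h : Int) - 1)).foldl (fun vis r =>
        (PySem.List.pyRange 1 ((w : Int) - 1)).foldl (fun vis c =>
          if pvBVisible grid (h : Int) (w : Int) r c then PySem.Set.add vis (pvKey r c) else vis) vis)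
      PySem.Set.empty).Nodup := by
  apply pv_foldl_nodup
  · intro T r hT
    apply pv_foldl_nodup
    · intro T' c hT'
      exact pv_nodup_ite_add _ _ _ hT'
    · exact hT
  · exact List.nodup_nil

-- ===== VERDICT (by name: the statement is the Claim_ definition above) =====
theorem get_visible_internal_trees_spec : Claim_equal_get_visible_internal_trees := by
  intro grid _ hpre
  unfold Spec_get_visible_internal_trees
  obtain ⟨hne, hcase⟩ := hpre
  simp only [get_visible_internal_trees, get_visible_internal_trees_alt]
  have hget0 : PySem.List.pyGetD grid 0 [] = grid.getD 0 [] := by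
    rw [PySem.List.pyGetD_of_nonneg _ _ (by norm_num : (0:Int) ≤ 0)]
    rfl
  have hgetD0 : grid.getD 0 [] = grid.headI := by cases grid <;> rfl
  by_cases hh2 : grid.length ≤ 2
  · -- fewer than three rows: both loops are empty and both sets are empty
    have hsl : PySem.List.slice grid (some 1) (some (-1)) = [] := by
      rw [pv_slice_interior]
      have he : grid.length - 2 = 0 := by omega
      rw [he, List.take_zero]
    have hr0 : PySem.List.pyRange 1 ((grid.length : Int) - 1) = [] :=
      pv_pyRange_nil _ _ (by omega)
    rw [hsl, hr0]
    rfl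
  · rcases hcase with hle | ⟨hrect, hhead⟩ | ⟨hshort, _⟩
    · omega
    · -- the main case: a rectangular grid with at least one column
      have hwpos : 1 ≤ grid.headI.length := by
        have : grid.headI.length ≠ 0 := fun hcon => hhead (List.eq_nil_of_length_eq_zero hcon)
        omega
      have hw : ∀ i, i < grid.length → (grid.getD i []).length = grid.headI.length := by
        intro i hi
        rw [List.getD_eq_getElem _ _ hi]
        exact hrect _ (List.getElem_mem hi)
      have hgetlast : PySem.List.pyGetD grid (-1) [] = grid.getD (grid.length - 1) [] :=
        pv_pyGetD_neg_one grid [] hne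
      rw [hget0, hgetlast, hw 0 (by omega)]
      have hLlen : (PySem.List.enumerate (PySem.List.slice grid (some 1) (some (-1)))).length
          = grid.length - 2 := by
        rw [PySem.List.length_enumerate, pv_slice_interior, List.length_take, List.length_drop]
        omega
      have hfull : PySem.List.enumerate (PySem.List.slice grid (some 1) (some (-1)))
          = (PySem.List.enumerate (PySem.List.slice grid (some 1) (some (-1)))).take
              (grid.length - 2) := by
        rw [← hLlen, List.take_length]
      rw [hfull]
      obtain ⟨o1, o2, o3, o4, o5, o6⟩ :=
        pvOuter_loop grid grid.headI.length hne hw hwpos (grid.length - 2) le_rfl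
      apply pv_sorted_eq_of_perm
      · rw [List.perm_ext_iff_of_nodup o5 (pvB_nodup grid grid.length grid.headI.length)]
        intro x
        rw [o6 x, pvB_mem grid grid.length grid.headI.length x]
        exact pvAdded_iff_spec grid grid.length grid.headI.length x
      · exact pvB_nodup grid grid.length grid.headI.length
    · -- every row has at most two entries: both loops add nothing
      have hslA : ∀ q ∈ PySem.List.enumerate (PySem.List.slice grid (some 1) (some (-1))),
          ∀ st, pvAOuter grid ((PySem.List.pyGetD grid 0 []).length : Int)
            (grid.length : Int) st q = st := by
        intro q hq st
        have hrow : q.2 ∈ grid := by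
          rcases (PySem.List.mem_enumerate_iff _ _ _).mp hq with ⟨k, hk, rfl⟩
          simp only [pv_slice_interior]
          exact List.mem_of_mem_drop (List.mem_of_mem_take (List.getElem_mem _))
        have hlen2 : q.2.length ≤ 2 := hshort _ hrow
        unfold pvAOuter
        simp only
        rw [pv_slice_interior]
        have he : q.2.length - 2 = 0 := by omega
        rw [he, List.take_zero]
        rfl
      rw [pv_foldl_id _ _ _ hslA]
      have hw2 : (PySem.List.pyGetD grid 0 []).length ≤ 2 := by
        rw [hget0, hgetD0]
        have hmem : grid.headI ∈ grid := by
          cases grid with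
          | nil => exact absurd rfl hne
          | cons a l => exact List.mem_cons_self
        exact hshort _ hmem
      have hrB : PySem.List.pyRange 1 (((PySem.List.pyGetD grid 0 []).length : Int) - 1)
          = [] := pv_pyRange_nil _ _ (by omega)
      rw [hrB]
      have hB := pv_foldl_id (PySem.List.pyRange 1 ((grid.length : Int) - 1))
        (fun vis r => List.foldl (fun vis c =>
          if pvBVisible grid (grid.length : Int) ((PySem.List.pyGetD grid 0 []).length : Int) r c
          then PySem.Set.add vis (pvKey r c) else vis) vis [])
        PySem.Set.empty (fun x _ s => List.foldl_nil)
      rw [hB]
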